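-- pv_equiv track=rewrite | github.com/kimsungmin1011/Algorithm | 프로그래머스/1/42840. 모의고사/모의고사.py | solution
-- ===== SOURCE A (Python) =====
-- def solution(answers):
--     answer = []
--     n = len(answers)
--
--     count1, count2, count3 = 0, 0, 0
--
--     array1 = [1, 2, 3, 4, 5]
--     array2 = [2, 1, 2, 3, 2, 4, 2, 5]
--     array3 = [3, 3, 1, 1, 2, 2, 4, 4, 5, 5]
--
--     for i in range(n):
--         if answers[i] == array1[i % len(array1)]:
--             count1 += 1
--         if answers[i] == array2[i % len(array2)]:
--             count2 += 1
--         if answers[i] == array3[i % len(array3)]: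
--             count3 += 1
--
--     max_answer = max(count1, count2, count3)
--
--     if count1 == max_answer:
--         answer.append(1)
--     if count2 == max_answer:
--         answer.append(2)
--     if count3 == max_answer:
--         answer.append(3)
--
--     return answer
-- ===== SOURCE B (Python) =====
-- def solution(answers):
--     # All three patterns are periodic with period dividing 40, so a histogram
--     # keyed by (position mod 40, answer) determines every score without
--     # re-reading answers per pattern.
--     hist = {}
--     for i, a in enumerate(answers):
--         k = (i % 40, a)
--         hist[k] = hist.get(k, 0) + 1
--     patterns = [[1, 2, 3, 4, 5],
--                 [2, 1, 2, 3, 2, 4, 2, 5],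
--                 [3, 3, 1, 1, 2, 2, 4, 4, 5, 5]]
--     scores = [sum(hist.get((r, p[r % len(p)]), 0) for r in range(40))
--               for p in patterns]
--     best = max(scores)
--     return [i + 1 for i, s in enumerate(scores) if s == best]
-- ===== Notes on version B (the rewrite author's own statement) =====
-- stated objective: alternative
-- what changed: Replaces the direct comparison loop with a histogram: one pass builds a dict counting (index mod 40, answer) pairs (40 = common period of the three patterns), then each pattern's score is read off the 40-entry table without touching answers again; winners are then selected by a comprehension over the score list.
import Mathlib
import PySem

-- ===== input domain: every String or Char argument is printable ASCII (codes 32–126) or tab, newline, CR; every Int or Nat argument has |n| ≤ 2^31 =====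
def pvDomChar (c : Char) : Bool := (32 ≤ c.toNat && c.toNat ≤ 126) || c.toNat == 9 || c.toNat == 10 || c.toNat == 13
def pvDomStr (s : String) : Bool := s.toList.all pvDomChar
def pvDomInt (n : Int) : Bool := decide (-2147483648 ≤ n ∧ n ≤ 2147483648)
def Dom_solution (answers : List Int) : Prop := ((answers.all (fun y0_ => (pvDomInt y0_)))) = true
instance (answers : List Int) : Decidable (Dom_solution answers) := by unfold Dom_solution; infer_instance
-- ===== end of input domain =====

-- B replaces A's direct comparison loop by a histogram keyed by (index mod 40, answer)
-- (40 = common period of the three patterns); scores are read off the table (alternative, same O(n)).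


-- ===== PORT A =====
def solution (answers : List Int) : List Int :=
  let n : Int := (answers.length : Int)
  let array1 : List Int := [1, 2, 3, 4, 5]
  let array2 : List Int := [2, 1, 2, 3, 2, 4, 2, 5]
  let array3 : List Int := [3, 3, 1, 1, 2, 2, 4, 4, 5, 5]
  let c := (PySem.List.pyRange 0 n 1).foldl (fun (c : Int × Int × Int) i =>
    let a := PySem.List.pyGetD answers i 0
    ((if a = PySem.List.pyGetD array1 (PySem.Int.mod i (array1.length : Int)) 0 then c.1 + 1 else c.1),
     (if a = PySem.List.pyGetD array2 (PySem.Int.mod i (array2.length : Int)) 0 then c.2.1 + 1 else c.2.1),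
     (if a = PySem.List.pyGetD array3 (PySem.Int.mod i (array3.length : Int)) 0 then c.2.2 + 1 else c.2.2)))
    (0, 0, 0)
  let maxAnswer := max (max c.1 c.2.1) c.2.2
  (if c.1 = maxAnswer then [1] else []) ++
  (if c.2.1 = maxAnswer then [2] else []) ++
  (if c.2.2 = maxAnswer then [3] else [])

-- ===== PORT B =====
-- the histogram: for i, a in enumerate(answers): k = (i % 40, a); hist[k] = hist.get(k, 0) + 1
def solAltHist (answers : List Int) : PySem.Dict (Int × Int) Int :=
  (PySem.List.enumerate answers 0).foldl
    (fun d ia =>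
      let k : Int × Int := (PySem.Int.mod ia.1 40, ia.2)
      d.insert k (d.getD k 0 + 1))
    PySem.Dict.empty

-- score of one pattern read off the histogram: sum(hist.get((r, p[r % len(p)]), 0) for r in range(40))
def solAltScore (hist : PySem.Dict (Int × Int) Int) (p : List Int) : Int :=
  ((PySem.List.pyRange 0 40 1).map (fun r =>
    hist.getD (r, PySem.List.pyGetD p (PySem.Int.mod r (p.length : Int)) 0) 0)).sum

def solution_alt (answers : List Int) : List Int :=
  let hist := solAltHist answers
  let patterns : List (List Int) := [[1, 2, 3, 4, 5], [2, 1, 2, 3, 2, 4, 2, 5], [3, 3, 1, 1, 2, 2, 4, 4, 5, 5]]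
  let scores := patterns.map (solAltScore hist)
  -- max(scores): scores always has 3 elements, so Python's max never raises
  let best := (PySem.List.max? scores (fun s => s)).getD 0
  (PySem.List.enumerate scores 0).filterMap (fun is => if is.2 = best then some (is.1 + 1) else none)

-- ===== PRECONDITION & SPEC =====
def Spec_solution (answers : List Int) (out : List Int) : Prop := out = solution_alt answers
instance (answers : List Int) (out : List Int) : Decidable (Spec_solution answers out) := by unfold Spec_solution; infer_instance

-- ===== CLAIM (what is proved, stated in full; the proofs are below) =====
def Claim_equal_solution : Prop := ∀ (answers : List Int), Dom_solution answers → Spec_solution answers (solution answers)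

-- ===== LEMMAS AND PROOFS =====

-- the triple-counter fold over the enumerate list is the triple of the three per-pattern sums
theorem triple_fold (L : List (Int × Int)) (p1 p2 p3 : List Int) (x y z : Int) :
    L.foldl (fun (c : Int × Int × Int) ia =>
      ((if ia.2 = PySem.List.pyGetD p1 (PySem.Int.mod ia.1 (p1.length : Int)) 0 then c.1 + 1 else c.1),
       (if ia.2 = PySem.List.pyGetD p2 (PySem.Int.mod ia.1 (p2.length : Int)) 0 then c.2.1 + 1 else c.2.1),
       (if ia.2 = PySem.List.pyGetD p3 (PySem.Int.mod ia.1 (p3.length : Int)) 0 then c.2.2 + 1 else c.2.2)))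
      (x, y, z)
    = (x + (L.map (fun ia => if ia.2 = PySem.List.pyGetD p1 (PySem.Int.mod ia.1 (p1.length : Int)) 0 then (1:Int) else 0)).sum,
       y + (L.map (fun ia => if ia.2 = PySem.List.pyGetD p2 (PySem.Int.mod ia.1 (p2.length : Int)) 0 then (1:Int) else 0)).sum,
       z + (L.map (fun ia => if ia.2 = PySem.List.pyGetD p3 (PySem.Int.mod ia.1 (p3.length : Int)) 0 then (1:Int) else 0)).sum) := by
  induction L generalizing x y z with
  | nil => simp
  | cons h t ih =>
    simp only [List.foldl_cons, List.map_cons, List.sum_cons, ih]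
    split_ifs <;> simp [Prod.ext_iff] <;> omega

-- sum over a nodup list of a one-point indicator
theorem sum_ind (l : List Int) (hl : l.Nodup) (m c : Int) :
    (l.map (fun r => if r = m then c else 0)).sum = if m ∈ l then c else 0 := by
  induction l with
  | nil => simp
  | cons h t ih =>
    simp only [List.map_cons, List.sum_cons, List.mem_cons]
    rcases List.nodup_cons.mp hl with ⟨hh, ht⟩
    rw [ih ht]
    by_cases h1 : h = m
    · subst h1; simp [hh]
    · simp [h1, Ne.symm h1]

-- per element: summing the histogram indicator over range(40) hits exactly the residue of its index
theorem hist_elem (p : List Int) (hp : (p.length : Int) ∣ 40) (hlen : 0 < p.length) (ia : Int × Int) :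
    ((PySem.List.pyRange 0 40 1).map (fun r =>
      if ((PySem.Int.mod ia.1 40, ia.2) : Int × Int) = (r, PySem.List.pyGetD p (PySem.Int.mod r (p.length : Int)) 0) then (1:Int) else 0)).sum
    = if ia.2 = PySem.List.pyGetD p (PySem.Int.mod ia.1 (p.length : Int)) 0 then 1 else 0 := by
  have hposlen : (0:Int) < (p.length : Int) := by exact_mod_cast hlen
  have hmm : PySem.Int.mod (PySem.Int.mod ia.1 40) (p.length : Int)
      = PySem.Int.mod ia.1 (p.length : Int) := by
    rw [PySem.Int.mod_eq_emod_of_pos (by norm_num : (0:Int) < 40),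
        PySem.Int.mod_eq_emod_of_pos hposlen, PySem.Int.mod_eq_emod_of_pos hposlen]
    exact Int.emod_emod_of_dvd ia.1 hp
  have key : ∀ r : Int,
      (if ((PySem.Int.mod ia.1 40, ia.2) : Int × Int) = (r, PySem.List.pyGetD p (PySem.Int.mod r (p.length : Int)) 0) then (1:Int) else 0)
      = (if r = PySem.Int.mod ia.1 40 then
          (if ia.2 = PySem.List.pyGetD p (PySem.Int.mod ia.1 (p.length : Int)) 0 then (1:Int) else 0) else 0) := by
    intro r
    by_cases hr : r = PySem.Int.mod ia.1 40
    · subst hr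
      rw [hmm, if_pos rfl]
      by_cases ha : ia.2 = PySem.List.pyGetD p (PySem.Int.mod ia.1 (p.length : Int)) 0
      · rw [if_pos ha, if_pos (by rw [ha])]
      · rw [if_neg ha, if_neg (fun h => ha (congrArg Prod.snd h))]
    · rw [if_neg (fun h => hr (congrArg Prod.fst h).symm), if_neg hr]
  rw [List.map_congr_left (fun r _ => key r)]
  rw [sum_ind _ (PySem.List.nodup_pyRange_one 0 40)]
  have hmem : PySem.Int.mod ia.1 40 ∈ PySem.List.pyRange 0 40 1 := by
    rw [PySem.List.mem_pyRange_one, PySem.Int.mod_eq_emod_of_pos (by norm_num : (0:Int) < 40)]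
    exact ⟨Int.emod_nonneg ia.1 (by norm_num), Int.emod_lt_of_pos ia.1 (by norm_num)⟩
  rw [if_pos hmem]

-- swapping the two summations: per-residue counts sum to the per-element indicator sum
theorem count_swap (L : List (Int × Int)) (p : List Int) (hp : (p.length : Int) ∣ 40) (hlen : 0 < p.length) :
    ((PySem.List.pyRange 0 40 1).map (fun r =>
      ((L.map (fun ia => ((PySem.Int.mod ia.1 40, ia.2) : Int × Int))).count
        (r, PySem.List.pyGetD p (PySem.Int.mod r (p.length : Int)) 0) : Int))).sum
    = (L.map (fun ia => if ia.2 = PySem.List.pyGetD p (PySem.Int.mod ia.1 (p.length : Int)) 0 then (1:Int) else 0)).sum := by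
  induction L with
  | nil => simp
  | cons x t ih =>
    have step : ∀ r,
        (((x :: t).map (fun ia => ((PySem.Int.mod ia.1 40, ia.2) : Int × Int))).count
          (r, PySem.List.pyGetD p (PySem.Int.mod r (p.length : Int)) 0) : Int)
        = ((t.map (fun ia => ((PySem.Int.mod ia.1 40, ia.2) : Int × Int))).count
            (r, PySem.List.pyGetD p (PySem.Int.mod r (p.length : Int)) 0) : Int)
          + (if ((PySem.Int.mod x.1 40, x.2) : Int × Int) = (r, PySem.List.pyGetD p (PySem.Int.mod r (p.length : Int)) 0) then 1 else 0) := by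
      intro r
      simp only [List.map_cons, List.count_cons]
      push_cast
      by_cases h : ((PySem.Int.mod x.1 40, x.2) : Int × Int) = (r, PySem.List.pyGetD p (PySem.Int.mod r (p.length : Int)) 0)
      · simp [h]
      · simp [beq_iff_eq, h]
    rw [List.map_congr_left (fun r _ => step r), PySem.List.sum_map_add_int, ih,
        hist_elem p hp hlen x]
    simp [add_comm]

-- the histogram score of a pattern equals the direct indicator sum over the enumerate list
theorem hist_score (L : List (Int × Int)) (p : List Int) (hp : (p.length : Int) ∣ 40) (hlen : 0 < p.length) :
    ((PySem.List.pyRange 0 40 1).map (fun r =>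
      (L.foldl (fun d ia =>
          let k : Int × Int := (PySem.Int.mod ia.1 40, ia.2)
          d.insert k (d.getD k 0 + 1)) PySem.Dict.empty).getD
        (r, PySem.List.pyGetD p (PySem.Int.mod r (p.length : Int)) 0) 0)).sum
    = (L.map (fun ia => if ia.2 = PySem.List.pyGetD p (PySem.Int.mod ia.1 (p.length : Int)) 0 then (1:Int) else 0)).sum := by
  have hfold : ∀ r v, (L.foldl (fun d ia =>
          let k : Int × Int := (PySem.Int.mod ia.1 40, ia.2)
          d.insert k (d.getD k 0 + 1)) PySem.Dict.empty).getD (r, v) 0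
      = ((L.map (fun ia => ((PySem.Int.mod ia.1 40, ia.2) : Int × Int))).count (r, v) : Int) := by
    intro r v
    have := PySem.Dict.getD_foldl_insert_add_one
      (l := L.map (fun ia => ((PySem.Int.mod ia.1 40, ia.2) : Int × Int)))
      (d := (PySem.Dict.empty : PySem.Dict (Int × Int) Int)) (v := (r, v))
    rw [List.foldl_map] at this
    simpa using this
  simp only [hfold]
  exact count_swap L p hp hlen

theorem hist_score1 (L : List (Int × Int)) :
    ((PySem.List.pyRange 0 40 1).map (fun r =>
      (L.foldl (fun d ia =>
          let k : Int × Int := (PySem.Int.mod ia.1 40, ia.2)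
          d.insert k (d.getD k 0 + 1)) PySem.Dict.empty).getD
        (r, PySem.List.pyGetD [1,2,3,4,5] (PySem.Int.mod r (([1,2,3,4,5] : List Int).length : Int)) 0) 0)).sum
    = (L.map (fun ia => if ia.2 = PySem.List.pyGetD [1,2,3,4,5] (PySem.Int.mod ia.1 (([1,2,3,4,5] : List Int).length : Int)) 0 then (1:Int) else 0)).sum :=
  hist_score L [1,2,3,4,5] (by norm_num) (by norm_num)

theorem hist_score2 (L : List (Int × Int)) :
    ((PySem.List.pyRange 0 40 1).map (fun r =>
      (L.foldl (fun d ia =>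
          let k : Int × Int := (PySem.Int.mod ia.1 40, ia.2)
          d.insert k (d.getD k 0 + 1)) PySem.Dict.empty).getD
        (r, PySem.List.pyGetD [2,1,2,3,2,4,2,5] (PySem.Int.mod r (([2,1,2,3,2,4,2,5] : List Int).length : Int)) 0) 0)).sum
    = (L.map (fun ia => if ia.2 = PySem.List.pyGetD [2,1,2,3,2,4,2,5] (PySem.Int.mod ia.1 (([2,1,2,3,2,4,2,5] : List Int).length : Int)) 0 then (1:Int) else 0)).sum :=
  hist_score L [2,1,2,3,2,4,2,5] (by norm_num) (by norm_num)

theorem hist_score3 (L : List (Int × Int)) :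
    ((PySem.List.pyRange 0 40 1).map (fun r =>
      (L.foldl (fun d ia =>
          let k : Int × Int := (PySem.Int.mod ia.1 40, ia.2)
          d.insert k (d.getD k 0 + 1)) PySem.Dict.empty).getD
        (r, PySem.List.pyGetD [3,3,1,1,2,2,4,4,5,5] (PySem.Int.mod r (([3,3,1,1,2,2,4,4,5,5] : List Int).length : Int)) 0) 0)).sum
    = (L.map (fun ia => if ia.2 = PySem.List.pyGetD [3,3,1,1,2,2,4,4,5,5] (PySem.Int.mod ia.1 (([3,3,1,1,2,2,4,4,5,5] : List Int).length : Int)) 0 then (1:Int) else 0)).sum :=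
  hist_score L [3,3,1,1,2,2,4,4,5,5] (by norm_num) (by norm_num)

theorem select (s1 s2 s3 : Int) :
    (if s1 = max (max s1 s2) s3 then ([1] : List Int) else []) ++
    (if s2 = max (max s1 s2) s3 then [2] else []) ++
    (if s3 = max (max s1 s2) s3 then [3] else [])
    = (PySem.List.enumerate [s1, s2, s3] 0).filterMap (fun is =>
        if is.2 = (PySem.List.max? [s1, s2, s3] (fun s => s)).getD 0 then some (is.1 + 1) else none) := by
  simp only [PySem.List.enumerate_cons, PySem.List.enumerate_nil, PySem.List.max?_id_cons,
    List.foldl_cons, List.foldl_nil, Option.getD_some, List.filterMap_cons, List.filterMap_nil]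
  generalize max (max s1 s2) s3 = m
  split_ifs <;> simp

theorem solution_eq (answers : List Int) : solution answers = solution_alt answers := by
  have hmap : ∀ (g : Int × Int × Int → Int × Int → Int × Int × Int),
      (PySem.List.pyRange 0 (answers.length : Int) 1).foldl
        (fun c i => g c (i, PySem.List.pyGetD answers i 0)) (0,0,0)
      = (PySem.List.enumerate answers 0).foldl g (0,0,0) := by
    intro g
    rw [PySem.List.enumerate_eq_map_pyRange (d := 0), List.foldl_map]
    simp [PySem.List.len_eq]
  unfold solution solution_alt solAltHist solAltScore
  simp only []
  rw [hmap (fun c ia =>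
      ((if ia.2 = PySem.List.pyGetD [1,2,3,4,5] (PySem.Int.mod ia.1 (([1,2,3,4,5] : List Int).length : Int)) 0 then c.1 + 1 else c.1),
       (if ia.2 = PySem.List.pyGetD [2,1,2,3,2,4,2,5] (PySem.Int.mod ia.1 (([2,1,2,3,2,4,2,5] : List Int).length : Int)) 0 then c.2.1 + 1 else c.2.1),
       (if ia.2 = PySem.List.pyGetD [3,3,1,1,2,2,4,4,5,5] (PySem.Int.mod ia.1 (([3,3,1,1,2,2,4,4,5,5] : List Int).length : Int)) 0 then c.2.2 + 1 else c.2.2))),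
    triple_fold]
  simp only [List.map_cons, List.map_nil, zero_add]
  simp only [hist_score1, hist_score2, hist_score3]
  exact select _ _ _

-- ===== VERDICT (by name: the statement is the Claim_ definition above) =====
theorem solution_spec : Claim_equal_solution := by
  intro answers _
  unfold Spec_solution
  exact solution_eq answers
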